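-- pv_equiv track=rewrite | github.com/JKH-ML/coding-test | study/baekjoon/stack/3986번 - 좋은 단어/좋은 단어.py | solution
-- ===== SOURCE A (Python) =====
-- def solution(n, data):
--     result = [1] * n
--     for i in range(n):
--
--         # 홀짝 체크도 O(n)이라 굳이 안해도 될 듯.
--         # nA = data[i].count('A')
--         # nB = data[i].count('B')
--
--         # # 홀수면 바로 실패
--         # if nA % 2 == 1 or nB % 2 == 1:
--         #     result[i] = 0
--         #     continue
--
--         stack = []
--         for s in data[i]:
--             if stack and stack[-1] == s:
--                 stack.pop()
--             else:
--                 stack.append(s)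
--
--         if stack:
--             result[i] = 0
--
--     return sum(result)
-- ===== SOURCE B (Python) =====
-- def _is_good(w):
--     # reduce to a normal form by repeatedly deleting the first adjacent equal pair
--     while True:
--         for i in range(len(w) - 1):
--             if w[i] == w[i + 1]:
--                 w = w[:i] + w[i + 2:]
--                 break
--         else:
--             return w == ''
--
-- def solution(n, data):
--     return sum(1 for i in range(n) if _is_good(data[i]))
-- ===== Notes on version B (the rewrite author's own statement) =====
-- stated objective: alternative
-- what changed: Replaces the single-pass stack matcher by a fixpoint rewriting that repeatedly deletes the first adjacent equal pair until none remains and tests whether the word reduced to empty (correct because pair-deletion is confluent), and replaces the preallocated 0/1 result array by a direct generator-sum count.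
import Mathlib
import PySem

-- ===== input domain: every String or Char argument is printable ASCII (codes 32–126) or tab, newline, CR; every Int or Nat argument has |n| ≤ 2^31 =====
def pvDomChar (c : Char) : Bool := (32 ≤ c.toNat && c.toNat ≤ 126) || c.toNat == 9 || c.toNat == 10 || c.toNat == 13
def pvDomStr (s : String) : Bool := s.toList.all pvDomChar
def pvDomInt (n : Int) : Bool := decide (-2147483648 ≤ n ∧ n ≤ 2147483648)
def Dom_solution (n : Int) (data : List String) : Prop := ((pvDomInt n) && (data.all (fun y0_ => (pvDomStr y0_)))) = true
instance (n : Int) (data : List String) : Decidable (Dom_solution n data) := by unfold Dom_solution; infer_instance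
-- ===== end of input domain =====

-- B replaces A's single-pass stack matcher by fixpoint deletion of the first adjacent
-- equal pair (word is good iff it reduces to empty) and a direct count instead of a
-- preallocated 0/1 result array; objective: alternative (not faster).

-- ===== PORT A =====
-- Python: if stack and stack[-1] == s: stack.pop() else: stack.append(s)
-- (stack represented with its top as the list head)
def solStep (stack : List Char) (s : Char) : List Char :=
  match stack with
  | t :: rest => if t = s then rest else s :: t :: rest
  | [] => [s]

def solution (n : Int) (data : List String) : Int :=
  let result : List Int := List.replicate n.toNat 1
  let result := (PySem.List.pyRange 0 n 1).foldl (fun res i =>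
    let stack := ((PySem.List.pyGetD data i "").toList).foldl solStep []
    if stack ≠ [] then res.set i.toNat 0 else res) result
  result.foldl (· + ·) 0

-- ===== PORT B =====
-- the inner 'for i in range(len(w)-1): if w[i]==w[i+1]: delete, break / else: done'
def delFirstPair : List Char → Option (List Char)
  | a :: b :: rest => if a = b then some rest else (delFirstPair (b :: rest)).map (a :: ·)
  | _ => none

theorem delFirstPair_length : ∀ (w w' : List Char), delFirstPair w = some w' → w'.length < w.length := by
  intro w
  induction w with
  | nil => intro w' h; simp [delFirstPair] at h
  | cons a tl ih =>
    intro w' h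
    cases tl with
    | nil => simp [delFirstPair] at h
    | cons b rest =>
      by_cases hab : a = b
      · simp [delFirstPair, hab] at h; simp [← h]
      · simp [delFirstPair, hab] at h
        obtain ⟨v, hv, rfl⟩ := h
        have := ih v hv
        simpa using Nat.succ_lt_succ this

-- the outer 'while True' loop of _is_good, run to the fixpoint
def reduceFix (w : List Char) : List Char :=
  match h : delFirstPair w with
  | some w' => reduceFix w'
  | none => w
termination_by w.length
decreasing_by exact delFirstPair_length w w' h

def solution_alt (n : Int) (data : List String) : Int :=
  (PySem.List.pyRange 0 n 1).foldl (fun acc i =>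
    if reduceFix ((PySem.List.pyGetD data i "").toList) = [] then acc + 1 else acc) 0

-- ===== PRECONDITION & SPEC =====
-- Pre_ excludes exactly the inputs where Python A raises IndexError: n larger than len(data).
def Pre_solution (n : Int) (data : List String) : Prop := n ≤ (data.length : Int)
instance (n : Int) (data : List String) : Decidable (Pre_solution n data) := by unfold Pre_solution; infer_instance
def pvWitness_solution : Int × List String := (3, ["ABBA", "AB", "ABAB"])

def Spec_solution (n : Int) (data : List String) (out : Int) : Prop := out = solution_alt n data
instance (n : Int) (data : List String) (out : Int) : Decidable (Spec_solution n data out) := by unfold Spec_solution; infer_instance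

-- ===== CLAIM (what is proved, stated in full; the proofs are below) =====
def Claim_equal_solution : Prop := ∀ (n : Int) (data : List String), Dom_solution n data → Pre_solution n data → Spec_solution n data (solution n data)

-- ===== LEMMAS AND PROOFS =====

-- the word at index i, shared by both ports
def wordAt (data : List String) (i : Int) : List Char := (PySem.List.pyGetD data i "").toList
-- B's 0/1 indicator for a word
def indAt (data : List String) (i : Int) : Int := if reduceFix (wordAt data i) = [] then 1 else 0

-- stacks reached by A never hold two equal adjacent elements
theorem solStep_chain (st : List Char) (s : Char) (h : st.IsChain (· ≠ ·)) :
    (solStep st s).IsChain (· ≠ ·) := by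
  match st with
  | [] => simp [solStep]
  | t :: rest =>
    by_cases hts : t = s
    · simp only [solStep, if_pos hts]
      cases rest with
      | nil => simp
      | cons u tl => exact (List.isChain_cons_cons.mp h).2
    · simp only [solStep, if_neg hts]
      exact List.isChain_cons_cons.mpr ⟨fun he => hts he.symm, h⟩

-- popping then pushing (or vice versa) the same char is the identity on well-formed stacks
theorem solStep_solStep (st : List Char) (a : Char) (h : st.IsChain (· ≠ ·)) :
    solStep (solStep st a) a = st := by
  match st with
  | [] => simp [solStep]
  | t :: tl =>
    by_cases hta : t = a
    · subst hta
      cases tl with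
      | nil => simp [solStep]
      | cons u tl' =>
        have htu : t ≠ u := (List.isChain_cons_cons.mp h).1
        simp [solStep, Ne.symm htu]
    · simp [solStep, hta]

-- deleting an adjacent equal pair does not change A's fold
theorem foldl_delFirstPair : ∀ (w w' st : List Char), st.IsChain (· ≠ ·) →
    delFirstPair w = some w' → w'.foldl solStep st = w.foldl solStep st := by
  intro w
  induction w with
  | nil => intro w' st _ h; simp [delFirstPair] at h
  | cons a tl ih =>
    intro w' st hst h
    cases tl with
    | nil => simp [delFirstPair] at h
    | cons b rest =>
      by_cases hab : a = b
      · simp only [delFirstPair, if_pos hab, Option.some.injEq] at h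
        subst h; subst hab
        simp only [List.foldl_cons]
        rw [solStep_solStep st a hst]
      · simp only [delFirstPair, if_neg hab, Option.map_eq_some_iff] at h
        obtain ⟨v, hv, rfl⟩ := h
        simp only [List.foldl_cons]
        exact ih v (solStep st a) (solStep_chain st a hst) hv

-- one-step unfoldings of the fixpoint loop
theorem reduceFix_of_some (w w' : List Char) (h : delFirstPair w = some w') :
    reduceFix w = reduceFix w' := by
  rw [reduceFix]
  split
  · next u hu => rw [h] at hu; cases hu; rfl
  · next hu => rw [h] at hu; cases hu

theorem reduceFix_of_none (w : List Char) (h : delFirstPair w = none) : reduceFix w = w := by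
  rw [reduceFix]
  split
  · next u hu => rw [h] at hu; cases hu
  · next hu => rfl

-- hence the fold is invariant under full reduction
theorem foldl_reduceFix (w st : List Char) (h : st.IsChain (· ≠ ·)) :
    (reduceFix w).foldl solStep st = w.foldl solStep st := by
  induction w using reduceFix.induct with
  | case1 w w' hdel ih =>
    rw [reduceFix_of_some w w' hdel, ih]
    exact foldl_delFirstPair w w' st h hdel
  | case2 w hdel =>
    rw [reduceFix_of_none w hdel]

theorem delFirstPair_reduceFix (w : List Char) : delFirstPair (reduceFix w) = none := by
  induction w using reduceFix.induct with
  | case1 w w' hdel ih => rw [reduceFix_of_some w w' hdel]; exact ih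
  | case2 w hdel => rw [reduceFix_of_none w hdel]; exact hdel

theorem delFirstPair_none (w : List Char) (h : delFirstPair w = none) : w.IsChain (· ≠ ·) := by
  induction w with
  | nil => simp
  | cons a tl ih =>
    cases tl with
    | nil => simp
    | cons b rest =>
      by_cases hab : a = b
      · simp [delFirstPair, hab] at h
      · simp only [delFirstPair, if_neg hab, Option.map_eq_none_iff] at h
        exact List.isChain_cons_cons.mpr ⟨hab, ih h⟩

-- on a pair-free word the stack fold just reverses the word
theorem foldl_nf : ∀ (w st : List Char), w.IsChain (· ≠ ·) →
    (∀ a, w.head? = some a → st.head? ≠ some a) → w.foldl solStep st = w.reverse ++ st := by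
  intro w
  induction w with
  | nil => intro st _ _; simp
  | cons a tl ih =>
    intro st hch hhd
    have hstep : solStep st a = a :: st := by
      match st with
      | [] => simp [solStep]
      | t :: tl' =>
        have hta : t ≠ a := fun he => hhd a rfl (by simp [he])
        simp [solStep, hta]
    rw [List.foldl_cons, hstep]
    have hch' : tl.IsChain (· ≠ ·) := by
      cases tl with
      | nil => simp
      | cons c tl2 => exact (List.isChain_cons_cons.mp hch).2
    have hhd' : ∀ b, tl.head? = some b → (a :: st).head? = some b → False := by
      intro b hb hab
      cases tl with
      | nil => simp at hb
      | cons c tl2 =>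
        simp at hb hab
        exact (List.isChain_cons_cons.mp hch).1 (hab.trans hb.symm)
    rw [ih (a :: st) hch' (fun b hb hab => hhd' b hb hab)]
    simp

-- A's per-word stack is exactly the reverse of B's normal form
theorem stack_eq_reverse (w : List Char) : w.foldl solStep [] = (reduceFix w).reverse := by
  rw [← foldl_reduceFix w [] (by simp)]
  rw [foldl_nf (reduceFix w) [] (delFirstPair_none _ (delFirstPair_reduceFix w)) (by simp)]
  simp

theorem foldl_add_sum : ∀ (l : List Int) (a : Int), l.foldl (· + ·) a = a + l.sum := by
  intro l
  induction l with
  | nil => simp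
  | cons x tl ih => intro a; simp [ih]; ring

theorem bfold_sum (data : List String) : ∀ (l : List Int) (acc : Int),
    l.foldl (fun acc i => if reduceFix ((PySem.List.pyGetD data i "").toList) = [] then acc + 1 else acc) acc
      = acc + (l.map (indAt data)).sum := by
  intro l
  induction l with
  | nil => intro acc; simp
  | cons x tl ih =>
    intro acc
    simp only [List.foldl_cons, List.map_cons, List.sum_cons, ih, indAt, wordAt]
    split_ifs <;> ring

-- the invariant of A's result-array loop
theorem afold_invariant (data : List String) (N : Nat) : ∀ (m : Nat), m ≤ N →
    (List.map (fun (k : Nat) => (k : Int)) (List.range m)).foldl (fun res i =>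
        if ((PySem.List.pyGetD data i "").toList).foldl solStep [] ≠ [] then res.set i.toNat 0 else res)
        (List.replicate N (1 : Int))
      = (List.range N).map (fun j => if j < m then indAt data (j : Int) else 1) := by
  intro m
  induction m with
  | zero =>
    intro _
    simp only [List.range_zero, List.map_nil, List.foldl_nil, Nat.not_lt_zero, if_false]
    apply List.ext_getElem <;> simp
  | succ m ih =>
    intro hm
    rw [List.range_succ, List.map_append, List.foldl_append, ih (Nat.le_of_succ_le hm)]
    simp only [List.map_cons, List.map_nil, List.foldl_cons, List.foldl_nil]
    rw [stack_eq_reverse]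
    simp only [ne_eq, List.reverse_eq_nil_iff, Int.toNat_natCast]
    by_cases hr : reduceFix ((PySem.List.pyGetD data (m : Int) "").toList) = []
    · simp only [hr, not_true]
      apply List.ext_getElem
      · simp
      · intro j h1 h2
        simp only [List.getElem_map, List.getElem_range]
        have hj : j < N := by simpa using h1
        by_cases hjm : j < m
        · simp [hjm, Nat.lt_succ_of_lt hjm]
        · by_cases hje : j = m
          · subst hje
            simp only [Nat.lt_succ_self, if_pos, indAt, wordAt]
            simpa using hr
          · have : ¬ j < m + 1 := by omega
            simp [hjm, this]
    · rw [if_pos hr]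
      apply List.ext_getElem
      · simp
      · intro j h1 h2
        have hj : j < N := by simpa using h2
        have hlen : m < ((List.range N).map (fun j => if j < m then indAt data (j : Int) else 1)).length := by
          simpa using lt_of_lt_of_le (Nat.lt_succ_self m) hm
        rw [List.getElem_set]
        simp only [List.getElem_map, List.getElem_range]
        by_cases hje : m = j
        · subst hje
          simp only [Nat.lt_succ_self, if_pos, indAt, wordAt]
          simpa using hr
        · by_cases hjm : j < m
          · simp [hje, hjm, Nat.lt_succ_of_lt hjm]
          · have : ¬ j < m + 1 := by omega
            simp [hje, hjm, this]

-- ===== VERDICT (by name: the statement is the Claim_ definition above) =====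
theorem solution_spec : Claim_equal_solution := by
  intro n data _ _
  simp only [Spec_solution, solution, solution_alt]
  by_cases hn : n ≤ 0
  · rw [PySem.List.pyRange_one_eq_nil hn]
    have h0 : n.toNat = 0 := Int.toNat_of_nonpos hn
    simp [h0]
  · push_neg at hn
    have h0 : (0 : Int) ≤ n := le_of_lt hn
    have hcast : ((n.toNat : Int)) = n := Int.toNat_of_nonneg h0
    have hpr : PySem.List.pyRange 0 n 1 = List.map (fun (k : Nat) => (k : Int)) (List.range n.toNat) := by
      rw [PySem.List.pyRange_one]
      simp [List.map_map]
    rw [hpr, afold_invariant data n.toNat n.toNat le_rfl, foldl_add_sum, bfold_sum]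
    simp only [zero_add, List.map_map]
    congr 1
    apply List.map_congr_left
    intro j hj
    have : j < n.toNat := List.mem_range.mp hj
    simp [Function.comp, this]
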